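-- pv_equiv track=rewrite | github.com/Mislav365/static_site_generator | src/markdownparser.py | _parse_styled_spans
-- ===== SOURCE A (Python) =====
-- def _parse_styled_spans(indexes):
--     events = []
--
--     # for each delimiter and its list of positions
--     for delim, positions in indexes.items():
--         # we loop through all positions and label them alternately as 'open' and 'close'
--         for i, pos in enumerate(positions):
--             kind = 'open' if i % 2 == 0 else 'close'
--             events.append((pos, delim, kind))
--
--     # sort all events by position in ascending order so we can process them correctly
--     events.sort()
--
--     code_ranges = []
--     stack = []
--
--     for pos, delim, kind in events:
--         if delim == '`':
--             if kind == 'open':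
--                 stack.append(pos)
--             elif kind == 'close' and stack:
--                 start = stack.pop()
--                 code_ranges.append((start, pos))
--
--     def is_inside_code(pos):
--         for start, end in code_ranges:
--             if start < pos < end:
--                 return True
--         return False
--
--     filtered_events = [
--         (pos, delim, kind)
--         for (pos, delim, kind) in events
--         if not is_inside_code(pos)
--     ]
--
--     return filtered_events
-- ===== SOURCE B (Python) =====
-- def _parse_styled_spans(indexes):
--     # Build and sort all events in one comprehension.
--     events = sorted(
--         (pos, delim, 'open' if i % 2 == 0 else 'close')
--         for delim, positions in indexes.items()
--         for i, pos in enumerate(positions)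
--     )
--
--     # Pair up backtick open/close events into code ranges (same stack pairing).
--     code_ranges = []
--     stack = []
--     for pos, delim, kind in events:
--         if delim == '`':
--             if kind == 'open':
--                 stack.append(pos)
--             elif kind == 'close' and stack:
--                 code_ranges.append((stack.pop(), pos))
--
--     # One synchronized sweep: events are sorted by position, so after sorting
--     # the ranges by start, a running maximum of the ends of all ranges whose
--     # start lies below the current position decides membership: an event is
--     # inside a code span iff that maximum exceeds its position.
--     code_ranges.sort(key=lambda r: r[0])
--     out = []
--     k = 0
--     cover = None
--     for pos, delim, kind in events:
--         while k < len(code_ranges) and code_ranges[k][0] < pos: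
--             end = code_ranges[k][1]
--             if cover is None or end > cover:
--                 cover = end
--             k += 1
--         if cover is None or cover <= pos:
--             out.append((pos, delim, kind))
--     return out
-- ===== Notes on version B (the rewrite author's own statement) =====
-- stated objective: alternative
-- what changed: A rescans the whole code_ranges list for every event (is_inside_code); B sorts the ranges by start once and filters all events in one synchronized sweep with a running maximum of range ends, so the per-event inner scan over the ranges disappears (it trades the inner scan for an extra sort of the ranges).
import Mathlib
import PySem

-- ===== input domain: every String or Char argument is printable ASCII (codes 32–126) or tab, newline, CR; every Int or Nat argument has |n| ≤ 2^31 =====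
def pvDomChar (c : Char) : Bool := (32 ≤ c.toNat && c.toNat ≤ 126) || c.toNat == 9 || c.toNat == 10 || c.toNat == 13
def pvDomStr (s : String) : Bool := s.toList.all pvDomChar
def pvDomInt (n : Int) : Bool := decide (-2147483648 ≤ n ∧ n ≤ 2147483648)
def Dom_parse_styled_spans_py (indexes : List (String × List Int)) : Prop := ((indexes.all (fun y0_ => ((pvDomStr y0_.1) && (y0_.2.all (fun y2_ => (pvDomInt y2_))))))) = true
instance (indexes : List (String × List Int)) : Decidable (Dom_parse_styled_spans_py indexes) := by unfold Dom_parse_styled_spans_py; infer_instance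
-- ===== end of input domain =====

-- B replaces A's per-event linear scan over all code ranges by a single synchronized
-- sweep over the ranges sorted by start, keeping a running maximum of range ends (alternative algorithm, same value).

-- Python's 3-tuple comparison (pos, delim, kind): lexicographic; exact for events.sort()
-- (Lean's String '<' is Python's str '<', code-point lexicographic — see PYSEM.md).
def pvKey3 (e : Int × String × String) : Lex (Int × Lex (String × String)) :=
  toLex (e.1, toLex (e.2.1, e.2.2))

-- the backtick stack loop shared verbatim by both Pythons (stack as head-cons list)
def pvRangesLoop (events : List (Int × String × String)) : List (Int × Int) × List Int :=
  events.foldl (fun (sr : List (Int × Int) × List Int) ev =>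
    if ev.2.1 == "`" then
      if ev.2.2 == "open" then (sr.1, ev.1 :: sr.2)
      else if ev.2.2 == "close" then
        match sr.2 with
        | s :: rest => (sr.1 ++ [(s, ev.1)], rest)
        | [] => sr
      else sr
    else sr) ([], [])

-- ===== PORT A =====
def parse_styled_spans_py (indexes : List (String × List Int)) : List (Int × String × String) :=
  let events0 := (PySem.Dict.ofList indexes).items.foldl (fun acc dp =>
      (PySem.List.enumerate dp.2).foldl (fun acc2 ip =>
        acc2 ++ [(ip.2, dp.1, if PySem.Int.mod ip.1 2 == 0 then "open" else "close")]) acc) []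
  let events := PySem.List.sorted events0 pvKey3 false
  let code_ranges := (pvRangesLoop events).1
  -- is_inside_code: a for-loop returning True on first hit = List.any
  events.filter (fun ev => !(code_ranges.any (fun r => decide (r.1 < ev.1) && decide (ev.1 < r.2))))

-- ===== PORT B =====
-- while k < len(ranges) and ranges[k][0] < pos: consume the range, update the running max of ends
def pvAdvance : List (Int × Int) → Option Int → Int → List (Int × Int) × Option Int
  | [], cover, _ => ([], cover)
  | r :: rs, cover, pos =>
    if r.1 < pos then
      pvAdvance rs (some (match cover with | none => r.2 | some c => if r.2 > c then r.2 else c)) pos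
    else (r :: rs, cover)

-- 'cover is None or cover <= pos'
def pvCoverOk : Option Int → Int → Bool
  | none, _ => true
  | some c, pos => c ≤ pos

-- the main loop of B: one pass over the sorted events, consuming sorted ranges
def pvSweep : List (Int × String × String) → List (Int × Int) → Option Int → List (Int × String × String)
  | [], _, _ => []
  | ev :: evs, rs, cover =>
    let rc := pvAdvance rs cover ev.1
    if pvCoverOk rc.2 ev.1 then ev :: pvSweep evs rc.1 rc.2 else pvSweep evs rc.1 rc.2

def parse_styled_spans_py_alt (indexes : List (String × List Int)) : List (Int × String × String) :=
  let events := PySem.List.sorted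
    ((PySem.Dict.ofList indexes).items.flatMap (fun dp =>
      (PySem.List.enumerate dp.2).map (fun ip =>
        (ip.2, dp.1, if PySem.Int.mod ip.1 2 == 0 then "open" else "close"))))
    pvKey3 false
  let code_ranges := PySem.List.sorted (pvRangesLoop events).1 (fun r => r.1) false
  pvSweep events code_ranges none

-- ===== PRECONDITION & SPEC =====
def Spec_parse_styled_spans_py (indexes : List (String × List Int)) (out : List (Int × String × String)) : Prop := out = parse_styled_spans_py_alt indexes
instance (indexes : List (String × List Int)) (out : List (Int × String × String)) : Decidable (Spec_parse_styled_spans_py indexes out) := by unfold Spec_parse_styled_spans_py; infer_instance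

-- ===== CLAIM (what is proved, stated in full; the proofs are below) =====
def Claim_equal_parse_styled_spans_py : Prop := ∀ (indexes : List (String × List Int)), Dom_parse_styled_spans_py indexes → Spec_parse_styled_spans_py indexes (parse_styled_spans_py indexes)

-- ===== LEMMAS AND PROOFS =====

-- running maximum of the ends of a list of ranges, exactly as pvAdvance accumulates it
def pvMaxEnd (C : List (Int × Int)) : Option Int :=
  C.foldl (fun c r => some (match c with | none => r.2 | some x => if r.2 > x then r.2 else x)) none

def pvInside (L : List (Int × Int)) (p : Int) : Bool :=
  L.any (fun r => decide (r.1 < p) && decide (p < r.2))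

theorem pvMaxEnd_append (C D : List (Int × Int)) :
    pvMaxEnd (C ++ D) = D.foldl (fun c r => some (match c with | none => r.2 | some x => if r.2 > x then r.2 else x)) (pvMaxEnd C) := by
  simp [pvMaxEnd, List.foldl_append]

theorem pvAdvance_eq (rs : List (Int × Int)) (cover : Option Int) (pos : Int) :
    pvAdvance rs cover pos =
      (rs.dropWhile (fun r => decide (r.1 < pos)),
       (rs.takeWhile (fun r => decide (r.1 < pos))).foldl
         (fun c r => some (match c with | none => r.2 | some x => if r.2 > x then r.2 else x)) cover) := by
  induction rs generalizing cover with
  | nil => simp [pvAdvance]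
  | cons r rs ih =>
    by_cases h : r.1 < pos
    · simp [pvAdvance, h, ih]
    · simp [pvAdvance, h]

-- characterisation of the running max: it exceeds pos iff some consumed range's end does
theorem pvStep_gt (c : Option Int) (r : Int × Int) (pos : Int) :
    (pvCoverOk (some (match c with | none => r.2 | some x => if r.2 > x then r.2 else x)) pos = false)
      ↔ (pvCoverOk c pos = false ∨ pos < r.2) := by
  cases c with
  | none => simp [pvCoverOk]
  | some x =>
    simp only [pvCoverOk]
    split_ifs with hx <;> simp <;> omega

-- characterisation of the running max: it exceeds pos iff some consumed range's end does
theorem pvMaxEnd_gt (C : List (Int × Int)) (pos : Int) :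
    (pvCoverOk (pvMaxEnd C) pos = false) ↔ ∃ r ∈ C, pos < r.2 := by
  suffices h : ∀ (acc : Option Int),
      (pvCoverOk (C.foldl (fun c r => some (match c with | none => r.2 | some x => if r.2 > x then r.2 else x)) acc) pos = false)
        ↔ (pvCoverOk acc pos = false) ∨ ∃ r ∈ C, pos < r.2 by
    have := h none
    simpa [pvMaxEnd, pvCoverOk] using this
  induction C with
  | nil => simp
  | cons r rs ih =>
    intro acc
    rw [List.foldl_cons, ih, pvStep_gt]
    constructor
    · rintro ((h | h) | ⟨x, hx, hgt⟩)
      · exact Or.inl h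
      · exact Or.inr ⟨r, List.mem_cons_self, h⟩
      · exact Or.inr ⟨x, List.mem_cons_of_mem _ hx, hgt⟩
    · rintro (h | ⟨x, hx, hgt⟩)
      · exact Or.inl (Or.inl h)
      · rcases List.mem_cons.1 hx with rfl | hx
        · exact Or.inl (Or.inr hgt)
        · exact Or.inr ⟨x, hx, hgt⟩

theorem dropWhile_ge_of_sorted (rs : List (Int × Int)) (pos : Int)
    (h : rs.Pairwise (fun a b => a.1 ≤ b.1)) :
    ∀ r ∈ rs.dropWhile (fun r => decide (r.1 < pos)), pos ≤ r.1 := by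
  induction rs with
  | nil => simp
  | cons r rs ih =>
    rcases List.pairwise_cons.1 h with ⟨hr, hrs⟩
    by_cases hlt : r.1 < pos
    · simpa [List.dropWhile_cons, hlt] using ih hrs
    · intro x hx
      rw [List.dropWhile_cons] at hx
      simp only [hlt, decide_false] at hx
      rcases List.mem_cons.1 hx with rfl | hx
      · omega
      · have := hr x hx; omega

-- the heart of the proof: the sweep computes the naive filter
theorem pvSweep_eq (evs : List (Int × String × String)) (C rs : List (Int × Int))
    (hev : evs.Pairwise (fun a b => a.1 ≤ b.1))
    (hrs : rs.Pairwise (fun a b => a.1 ≤ b.1))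
    (hC : ∀ r ∈ C, ∀ ev ∈ evs, r.1 < ev.1) :
    pvSweep evs rs (pvMaxEnd C) = evs.filter (fun ev => !pvInside (C ++ rs) ev.1) := by
  induction evs generalizing C rs with
  | nil => simp [pvSweep]
  | cons ev evs ih =>
    rcases List.pairwise_cons.1 hev with ⟨hev1, hev2⟩
    set T := rs.takeWhile (fun r => decide (r.1 < ev.1)) with hT
    set rs' := rs.dropWhile (fun r => decide (r.1 < ev.1)) with hrs'
    have hsplit : T ++ rs' = rs := List.takeWhile_append_dropWhile
    have hadv : pvAdvance rs (pvMaxEnd C) ev.1 = (rs', pvMaxEnd (C ++ T)) := by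
      rw [pvAdvance_eq, pvMaxEnd_append]
    -- membership facts
    have hTlt : ∀ r ∈ T, r.1 < ev.1 := by
      intro r hr
      have := List.mem_takeWhile_imp hr
      simpa using this
    have hrs'ge : ∀ r ∈ rs', ev.1 ≤ r.1 := dropWhile_ge_of_sorted rs ev.1 hrs
    have hC' : ∀ r ∈ C ++ T, r.1 < ev.1 := by
      intro r hr
      rcases List.mem_append.1 hr with hr | hr
      · exact hC r hr ev (List.mem_cons_self)
      · exact hTlt r hr
    -- keep-condition for the head
    have h1 : pvInside (C ++ rs) ev.1 = pvInside (C ++ T) ev.1 := by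
      rw [← hsplit, ← List.append_assoc]
      simp only [pvInside, List.any_append]
      have hz : rs'.any (fun r => decide (r.1 < ev.1) && decide (ev.1 < r.2)) = false := by
        simp only [List.any_eq_false]
        intro r hr
        have := hrs'ge r hr
        simp; omega
      simp [hz]
    have h2 : pvInside (C ++ T) ev.1 = true ↔ ∃ r ∈ C ++ T, ev.1 < r.2 := by
      simp only [pvInside, List.any_eq_true]
      constructor
      · rintro ⟨r, hr, hp⟩
        refine ⟨r, hr, ?_⟩
        simp at hp; omega
      · rintro ⟨r, hr, hp⟩
        exact ⟨r, hr, by simp [hC' r hr, hp]⟩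
    -- recursive call
    have hCrec : ∀ r ∈ C ++ T, ∀ e ∈ evs, r.1 < e.1 := by
      intro r hr e he
      have h3 := hC' r hr
      have h4 := hev1 e he
      omega
    have hrsrec : rs'.Pairwise (fun a b => a.1 ≤ b.1) := by
      rw [hrs']
      exact hrs.sublist (List.dropWhile_sublist _)
    have hrec := ih (C ++ T) rs' hev2 hrsrec hCrec
    have hlist : (C ++ T) ++ rs' = C ++ rs := by rw [List.append_assoc, hsplit]
    rw [hlist] at hrec
    simp only [pvSweep]
    rw [hadv]
    rcases Bool.eq_false_or_eq_true (pvCoverOk (pvMaxEnd (C ++ T)) ev.1) with h | h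
    · -- cover does not exceed pos: the head event is kept
      have hnot : ¬ ∃ r ∈ C ++ T, ev.1 < r.2 := by
        intro hc
        have h5 := (pvMaxEnd_gt (C ++ T) ev.1).2 hc
        rw [h] at h5; cases h5
      have hin : pvInside (C ++ rs) ev.1 = false := by
        rw [h1]
        rcases Bool.eq_false_or_eq_true (pvInside (C ++ T) ev.1) with hh | hh
        · exact absurd (h2.1 hh) hnot
        · exact hh
      simp [h, hin, hrec]
    · -- cover exceeds pos: the head event is inside a code span, dropped
      have hin : pvInside (C ++ rs) ev.1 = true := by
        rw [h1]; exact h2.2 ((pvMaxEnd_gt (C ++ T) ev.1).1 h)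
      simp [h, hin, hrec]

theorem pairwise_fst_sorted (l : List (Int × String × String)) :
    (PySem.List.sorted l pvKey3 false).Pairwise (fun a b => a.1 ≤ b.1) := by
  refine (PySem.List.sorted_pairwise (xs := l) (key := pvKey3)).imp ?_
  intro a b hab
  rcases Prod.Lex.le_iff.1 hab with h1 | ⟨h1, _⟩
  · exact le_of_lt h1
  · exact le_of_eq h1

theorem pvInside_perm {L L' : List (Int × Int)} (h : L.Perm L') (p : Int) :
    pvInside L p = pvInside L' p := by
  simp only [pvInside]
  rcases Bool.eq_false_or_eq_true (L'.any (fun r => decide (r.1 < p) && decide (p < r.2))) with hh | hh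
  · rw [hh]
    simp only [List.any_eq_true] at hh ⊢
    obtain ⟨r, hr, hp⟩ := hh
    exact ⟨r, h.mem_iff.2 hr, hp⟩
  · rw [hh]
    simp only [List.any_eq_false] at hh ⊢
    intro r hr
    exact hh r (h.mem_iff.1 hr)

-- A's filter equals B's sweep, for any event list sorted by position and any range list
theorem pv_final (events : List (Int × String × String)) (cr : List (Int × Int))
    (hev : events.Pairwise (fun a b => a.1 ≤ b.1)) :
    events.filter (fun ev => !(cr.any (fun r => decide (r.1 < ev.1) && decide (ev.1 < r.2))))
      = pvSweep events (PySem.List.sorted cr (fun r => r.1) false) none := by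
  have hsweep := pvSweep_eq events [] (PySem.List.sorted cr (fun r => r.1) false)
    hev (PySem.List.sorted_pairwise (xs := cr) (key := fun r => r.1)) (by simp)
  have hmax : pvMaxEnd ([] : List (Int × Int)) = none := rfl
  rw [hmax] at hsweep
  rw [hsweep]
  simp only [List.nil_append]
  apply List.filter_congr
  intro ev _
  have hp := pvInside_perm (PySem.List.sorted_perm cr (fun r => r.1) false) ev.1
  simp only [pvInside] at hp ⊢
  rw [hp]

-- ===== VERDICT (by name: the statement is the Claim_ definition above) =====
theorem parse_styled_spans_py_spec : Claim_equal_parse_styled_spans_py := by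
  intro indexes _
  show parse_styled_spans_py indexes = parse_styled_spans_py_alt indexes
  have hev : ((PySem.Dict.ofList indexes).items.foldl (fun acc dp =>
      (PySem.List.enumerate dp.2).foldl (fun acc2 ip =>
        acc2 ++ [(ip.2, dp.1, if PySem.Int.mod ip.1 2 == 0 then "open" else "close")]) acc) [])
      = (PySem.Dict.ofList indexes).items.flatMap (fun dp =>
          (PySem.List.enumerate dp.2).map (fun ip =>
            (ip.2, dp.1, if PySem.Int.mod ip.1 2 == 0 then "open" else "close"))) := by
    rw [PySem.List.foldl_congr_mem (g := fun acc dp => acc ++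
        (PySem.List.enumerate dp.2).map (fun ip =>
          (ip.2, dp.1, if PySem.Int.mod ip.1 2 == 0 then "open" else "close")))]
    · rw [PySem.List.foldl_append_eq_flatMap]; simp
    · intro acc dp _
      rw [PySem.List.foldl_append_singleton_eq_map]
  simp only [parse_styled_spans_py, parse_styled_spans_py_alt]
  rw [hev]
  exact pv_final _ _ (pairwise_fst_sorted _)
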